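-- pv_equiv track=rewrite | github.com/bptripp/calc | calc/data.py | _map_axon_termination_layers_to_cell_layers
-- ===== SOURCE A (Python) =====
-- def _map_axon_termination_layers_to_cell_layers(layers):
--     """
--     :param layers: List of six boolean values corresponding to presence of axon terminals in layers 1-6.
--     :return: List of five boolean values corresponding to estimated presence of connections to cells in
--         layers 1, 2/3, 4, 5, 6. These estimates are made based on tables in Binzegger et al. (2004)
--         supplementary material, which breaks down synapses in each layer by target cell type
--         and cell-body layer. If >5% of unclassified asymmetric synapses in layer A are onto
--         excitatory cells in layer B, we map a True in layer-A input to a True in layer-B return value.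
--
--         The mappings are:  axon terminals in layer       suggests synapses onto cells in layer
--                             1                               2/3, 4, 5
--                             2/3                             2/3
--                             4                               4, 6
--                             5                               5, 6
--                             6                               6
--
--         There are actually no unclassified asymmetric synapses in layer 2/3 according to Binzegger et al.,
--         but they studied V1. According to Felleman & Van Essen (1991) we should expect these mainly in
--         areas with lateral inter-area connections, which are absent from V1. Here we assume such synapses
--         are onto layer 2/3 cells.
--
--         We ignore inhibitory neurons (as we do throughout this project) due to
--         reasoning in Parisien et al.
--
--         Code for calculating the fractions is in _print_fraction_asymmetric(), below.
--     """
--     map = [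
--         ['2/3', '4', '5'],
--         ['2/3'],
--         ['2/3'],
--         ['4', '6'],
--         ['5', '6'],
--         ['6']
--     ]
--
--     result = []
--     for i in range(6):
--         if layers[i]:
--             result.extend(map[i])
--
--     return sorted(list(set(result)))
-- ===== SOURCE B (Python) =====
-- def _map_axon_termination_layers_to_cell_layers(layers):
--     # Read all six input bits up front (IndexError on short input, like the original).
--     bits = [layers[i] for i in range(6)]
--     # Reverse mapping: each output cell layer <- axon-termination layers that imply it,
--     # listed in the output's (sorted) order, so no set/sort is needed.
--     contributors = [('2/3', (0, 1, 2)), ('4', (0, 3)), ('5', (0, 4)), ('6', (3, 4, 5))]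
--     return [label for label, idxs in contributors if any(bits[i] for i in idxs)]
-- ===== Notes on version B (the rewrite author's own statement) =====
-- stated objective: alternative
-- what changed: B inverts the mapping: instead of accumulating forward-mapped labels per input layer and then deduplicating and sorting, it iterates over the four output labels in fixed sorted order and keeps each label if any of its contributing input bits is set, so no set and no sort are needed.
import Mathlib
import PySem

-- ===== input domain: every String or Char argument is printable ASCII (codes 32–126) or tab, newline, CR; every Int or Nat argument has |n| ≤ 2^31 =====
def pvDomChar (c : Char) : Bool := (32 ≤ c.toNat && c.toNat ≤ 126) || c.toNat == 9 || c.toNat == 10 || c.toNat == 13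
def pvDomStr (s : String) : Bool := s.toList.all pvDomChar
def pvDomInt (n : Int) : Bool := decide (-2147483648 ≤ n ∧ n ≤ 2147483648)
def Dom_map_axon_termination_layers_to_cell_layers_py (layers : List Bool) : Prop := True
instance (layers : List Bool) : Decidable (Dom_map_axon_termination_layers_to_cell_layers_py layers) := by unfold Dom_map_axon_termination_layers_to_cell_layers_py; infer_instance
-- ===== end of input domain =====

-- B inverts the mapping (fixed-order scan over output labels with their contributing input
-- indices) instead of forward-accumulate + set + sort; same values on all inputs with ≥ 6 elements.
-- ===== PORT A =====
def pvMapTable : List (List String) :=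
  [["2/3", "4", "5"], ["2/3"], ["2/3"], ["4", "6"], ["5", "6"], ["6"]]

def map_axon_termination_layers_to_cell_layers_py (layers : List Bool) : List String :=
  let result := (PySem.List.pyRange 0 6 1).foldl
    (fun r i =>
      if PySem.List.pyGetD layers i false then r ++ PySem.List.pyGetD pvMapTable i [] else r) []
  PySem.List.sorted (PySem.Set.ofList result) (fun x => x) false

-- ===== PORT B =====
def pvContributors : List (String × List Int) :=
  [("2/3", [0, 1, 2]), ("4", [0, 3]), ("5", [0, 4]), ("6", [3, 4, 5])]

def map_axon_termination_layers_to_cell_layers_py_alt (layers : List Bool) : List String :=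
  let bits := (PySem.List.pyRange 0 6 1).map (fun i => PySem.List.pyGetD layers i false)
  (pvContributors.filter (fun p => p.2.any (fun i => PySem.List.pyGetD bits i false))).map (·.1)

-- ===== PRECONDITION & SPEC =====
-- Python A raises IndexError on lists shorter than 6 (it reads layers[0..5]); B reads the same six.
def Pre_map_axon_termination_layers_to_cell_layers_py (layers : List Bool) : Prop :=
  6 ≤ layers.length
instance (layers : List Bool) : Decidable (Pre_map_axon_termination_layers_to_cell_layers_py layers) := by
  unfold Pre_map_axon_termination_layers_to_cell_layers_py; infer_instance
def pvWitness_map_axon_termination_layers_to_cell_layers_py : List Bool :=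
  [true, false, true, false, false, true]

def Spec_map_axon_termination_layers_to_cell_layers_py (layers : List Bool) (out : List String) : Prop := out = map_axon_termination_layers_to_cell_layers_py_alt layers
instance (layers : List Bool) (out : List String) : Decidable (Spec_map_axon_termination_layers_to_cell_layers_py layers out) := by unfold Spec_map_axon_termination_layers_to_cell_layers_py; infer_instance

-- ===== CLAIM (what is proved, stated in full; the proofs are below) =====
def Claim_equal_map_axon_termination_layers_to_cell_layers_py : Prop := ∀ (layers : List Bool), Dom_map_axon_termination_layers_to_cell_layers_py layers → Pre_map_axon_termination_layers_to_cell_layers_py layers → Spec_map_axon_termination_layers_to_cell_layers_py layers (map_axon_termination_layers_to_cell_layers_py layers)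

-- ===== LEMMAS AND PROOFS =====
theorem pvRange6 : PySem.List.pyRange 0 6 1 = [0, 1, 2, 3, 4, 5] := by
  rw [PySem.List.pyRange_one]; rfl

theorem pvGet0 (x0 x1 x2 x3 x4 x5 : Bool) (rest : List Bool) :
    PySem.List.pyGetD (x0::x1::x2::x3::x4::x5::rest) 0 false = x0 := by
  simp [PySem.List.pyGetD, PySem.List.pyGet?, PySem.List.pyIdx?,
        show (0:Int) ≤ (rest.length:Int)+1+1+1+1+1 from by omega]

theorem pvGet1 (x0 x1 x2 x3 x4 x5 : Bool) (rest : List Bool) :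
    PySem.List.pyGetD (x0::x1::x2::x3::x4::x5::rest) 1 false = x1 := by
  simp [PySem.List.pyGetD, PySem.List.pyGet?, PySem.List.pyIdx?,
        show (0:Int) ≤ (rest.length:Int)+1+1+1+1 from by omega]

theorem pvGet2 (x0 x1 x2 x3 x4 x5 : Bool) (rest : List Bool) :
    PySem.List.pyGetD (x0::x1::x2::x3::x4::x5::rest) 2 false = x2 := by
  simp [PySem.List.pyGetD, PySem.List.pyGet?, PySem.List.pyIdx?,
        show (2:Int) ≤ (rest.length:Int)+1+1+1+1+1 from by omega]

theorem pvGet3 (x0 x1 x2 x3 x4 x5 : Bool) (rest : List Bool) :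
    PySem.List.pyGetD (x0::x1::x2::x3::x4::x5::rest) 3 false = x3 := by
  simp [PySem.List.pyGetD, PySem.List.pyGet?, PySem.List.pyIdx?,
        show (3:Int) ≤ (rest.length:Int)+1+1+1+1+1 from by omega]

theorem pvGet4 (x0 x1 x2 x3 x4 x5 : Bool) (rest : List Bool) :
    PySem.List.pyGetD (x0::x1::x2::x3::x4::x5::rest) 4 false = x4 := by
  simp [PySem.List.pyGetD, PySem.List.pyGet?, PySem.List.pyIdx?,
        show (4:Int) ≤ (rest.length:Int)+1+1+1+1+1 from by omega]

theorem pvGet5 (x0 x1 x2 x3 x4 x5 : Bool) (rest : List Bool) :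
    PySem.List.pyGetD (x0::x1::x2::x3::x4::x5::rest) 5 false = x5 := by
  simp [PySem.List.pyGetD, PySem.List.pyGet?, PySem.List.pyIdx?,
        show (5:Int) ≤ (rest.length:Int)+1+1+1+1+1 from by omega]

-- ===== VERDICT (by name: the statement is the Claim_ definition above) =====
theorem map_axon_termination_layers_to_cell_layers_py_spec : Claim_equal_map_axon_termination_layers_to_cell_layers_py := by
  intro layers _ hpre
  unfold Spec_map_axon_termination_layers_to_cell_layers_py
  match layers, hpre with
  | a :: b :: c :: d :: e :: f :: rest, _ =>
    simp only [map_axon_termination_layers_to_cell_layers_py,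
      map_axon_termination_layers_to_cell_layers_py_alt,
      pvRange6, pvMapTable, pvContributors,
      List.foldl, List.map, List.filter, List.any,
      pvGet0, pvGet1, pvGet2, pvGet3, pvGet4, pvGet5]
    cases a <;> cases b <;> cases c <;> cases d <;> cases e <;> cases f <;>
      (simp [PySem.List.sorted_eq_foldl_insertBy, PySem.Set.ofList, PySem.Set.add,
             PySem.List.insertBy, PySem.List.pyGetD, PySem.List.pyGet?, PySem.List.pyIdx?]
       try decide)
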